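-- pv_equiv track=rewrite | github.com/neogan74/dev-experiments | contests/Aoc/2025/2/solution.py | generate_repeated_numbers
-- ===== SOURCE A (Python) =====
-- from typing import List, Tuple
--
-- def generate_repeated_numbers(limit: int, max_repeat: int) -> List[int]:
--     # Generate all numbers up to limit that are formed by repeating a digit
--     # sequence k times, k >= 2. If max_repeat == 0, allow any k >= 2.
--     seen = set()
--     len_seq = 1
--     while True:
--         pow10 = 10 ** len_seq
--         min_seq = pow10 // 10
--         if min_seq == 0:
--             len_seq += 1
--             continue
--
--         any_added = False
--         repeat = 2
--         while True:
--             if max_repeat and repeat > max_repeat: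
--                 break
--
--             geom = (pow10 ** repeat - 1) // (pow10 - 1)  # 1 + pow + ... + pow^(k-1)
--             min_val = min_seq * geom
--             if min_val > limit:
--                 break
--
--             max_seq = pow10 - 1
--             end_seq = min(max_seq, limit // geom)
--             if end_seq >= min_seq:
--                 any_added = True
--                 for seq in range(min_seq, end_seq + 1):
--                     val = seq * geom
--                     if val <= limit:
--                         seen.add(val)
--             repeat += 1
--
--         # If even the smallest repeated number for this len_seq exceeds limit, stop.
--         if not any_added and (min_seq * ((pow10 * pow10 - 1) // (pow10 - 1)) > limit):
--             break
--         len_seq += 1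
--
--     nums = sorted(seen)
--     return nums
-- ===== SOURCE B (Python) =====
-- def generate_repeated_numbers(limit, max_repeat):
--     # Seq-outer Horner scheme: for each block length p, extend each block's
--     # repeated value one repetition at a time (val -> val*base + seq).
--     seen = set()
--     p = 1
--     while 10 ** (p - 1) * (10 ** p + 1) <= limit:
--         base = 10 ** p
--         for seq in range(base // 10, base):
--             val = seq * base + seq
--             k = 2
--             while val <= limit:
--                 if max_repeat == 0 or k <= max_repeat:
--                     seen.add(val)
--                 val = val * base + seq
--                 k += 1
--         p += 1
--     return sorted(seen)
-- ===== Notes on version B (the rewrite author's own statement) =====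
-- stated objective: alternative
-- what changed: A's repeat-outer loops with closed-form geometric quotients, floor divisions and a seen/any_added break protocol are replaced by a seq-outer Horner recurrence (val -> val*base + seq) that extends each block one repetition at a time, with a single closed-form loop guard and no divisions in the hot path.
import Mathlib
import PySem

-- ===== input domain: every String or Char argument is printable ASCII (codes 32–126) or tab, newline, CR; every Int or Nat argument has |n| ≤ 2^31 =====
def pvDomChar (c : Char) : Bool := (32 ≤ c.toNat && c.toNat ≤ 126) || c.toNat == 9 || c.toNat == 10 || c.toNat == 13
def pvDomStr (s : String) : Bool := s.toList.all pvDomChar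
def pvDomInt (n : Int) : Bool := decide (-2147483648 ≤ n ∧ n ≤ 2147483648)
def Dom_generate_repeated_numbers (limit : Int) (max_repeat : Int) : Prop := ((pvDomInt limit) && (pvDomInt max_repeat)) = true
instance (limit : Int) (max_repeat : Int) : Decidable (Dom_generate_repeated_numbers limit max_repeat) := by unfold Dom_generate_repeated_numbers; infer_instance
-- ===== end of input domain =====

-- B replaces A's repeat-outer loops with closed-form geometric quotients by a
-- seq-outer Horner recurrence (val -> val*base + seq), an alternative of similar cost.

-- ===== PORT A =====
-- inner 'while True' over repeat; fuel only makes the recursion total (the loop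
-- breaks long before the fuel is spent — see the characterization lemmas below)
def aInner (limit max_repeat pow10 min_seq : Int) (fuel : Nat) (seen : PySem.Set Int)
    (any_added : Bool) (rep : Nat) : PySem.Set Int × Bool :=
  match fuel with
  | 0 => (seen, any_added)
  | fuel + 1 =>
    if max_repeat ≠ 0 ∧ max_repeat < (rep : Int) then (seen, any_added)
    else
      let geom := PySem.Int.floordiv (pow10 ^ rep - 1) (pow10 - 1)
      let min_val := min_seq * geom
      if limit < min_val then (seen, any_added)
      else
        let max_seq := pow10 - 1
        let end_seq := min max_seq (PySem.Int.floordiv limit geom)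
        if min_seq ≤ end_seq then
          let seen' := (PySem.List.pyRange min_seq (end_seq + 1) 1).foldl
            (fun s seq => let val := seq * geom; if val ≤ limit then PySem.Set.add s val else s) seen
          aInner limit max_repeat pow10 min_seq fuel seen' true (rep + 1)
        else
          aInner limit max_repeat pow10 min_seq fuel seen any_added (rep + 1)

-- outer 'while True' over len_seq
def aOuter (limit max_repeat : Int) (fuel : Nat) (len_seq : Nat) (seen : PySem.Set Int) :
    PySem.Set Int :=
  match fuel with
  | 0 => seen
  | fuel + 1 =>
    let pow10 : Int := 10 ^ len_seq
    let min_seq := PySem.Int.floordiv pow10 10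
    if min_seq = 0 then aOuter limit max_repeat fuel (len_seq + 1) seen
    else
      let r := aInner limit max_repeat pow10 min_seq (limit.toNat + 2) seen false 2
      if ¬ r.2 ∧ limit < min_seq * PySem.Int.floordiv (pow10 * pow10 - 1) (pow10 - 1) then r.1
      else aOuter limit max_repeat fuel (len_seq + 1) r.1

def generate_repeated_numbers (limit : Int) (max_repeat : Int) : List Int :=
  PySem.List.sorted (aOuter limit max_repeat (limit.toNat + 2) 1 PySem.Set.empty) (fun x => x) false

-- ===== PORT B =====
-- inner 'while val <= limit' with the Horner accumulator val
def bInner (limit max_repeat base seq : Int) (fuel : Nat) (seen : PySem.Set Int)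
    (val : Int) (k : Nat) : PySem.Set Int :=
  match fuel with
  | 0 => seen
  | fuel + 1 =>
    if val ≤ limit then
      let seen' := if max_repeat = 0 ∨ (k : Int) ≤ max_repeat then PySem.Set.add seen val else seen
      bInner limit max_repeat base seq fuel seen' (val * base + seq) (k + 1)
    else seen

-- 'for seq in range(base // 10, base)'
def bSeq (limit max_repeat base : Int) (seen : PySem.Set Int) : PySem.Set Int :=
  (PySem.List.pyRange (PySem.Int.floordiv base 10) base 1).foldl
    (fun s seq => bInner limit max_repeat base seq (limit.toNat + 2) s (seq * base + seq) 2) seen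

-- 'while 10**(p-1) * (10**p + 1) <= limit'
def bOuter (limit max_repeat : Int) (fuel : Nat) (p : Nat) (seen : PySem.Set Int) :
    PySem.Set Int :=
  match fuel with
  | 0 => seen
  | fuel + 1 =>
    if (10 : Int) ^ (p - 1) * ((10 : Int) ^ p + 1) ≤ limit then
      bOuter limit max_repeat fuel (p + 1) (bSeq limit max_repeat ((10 : Int) ^ p) seen)
    else seen

def generate_repeated_numbers_alt (limit : Int) (max_repeat : Int) : List Int :=
  PySem.List.sorted (bOuter limit max_repeat (limit.toNat + 2) 1 PySem.Set.empty) (fun x => x) false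

-- ===== PRECONDITION & SPEC =====
def Spec_generate_repeated_numbers (limit : Int) (max_repeat : Int) (out : List Int) : Prop := out = generate_repeated_numbers_alt limit max_repeat
instance (limit : Int) (max_repeat : Int) (out : List Int) : Decidable (Spec_generate_repeated_numbers limit max_repeat out) := by unfold Spec_generate_repeated_numbers; infer_instance

-- ===== CLAIM (what is proved, stated in full; the proofs are below) =====
def Claim_equal_generate_repeated_numbers : Prop := ∀ (limit : Int) (max_repeat : Int), Dom_generate_repeated_numbers limit max_repeat → Spec_generate_repeated_numbers limit max_repeat (generate_repeated_numbers limit max_repeat)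

-- ===== LEMMAS AND PROOFS =====

-- S b k = 1 + b + … + b^(k-1): the common value of A's geometric quotient and B's Horner accumulator
def S (b : Int) : Nat → Int
  | 0 => 0
  | k + 1 => S b k * b + 1

-- 'k is an admissible repeat count': max_repeat == 0 allows any k, else k ≤ max_repeat
def Allowed (max_repeat : Int) (k : Nat) : Prop := max_repeat = 0 ∨ (k : Int) ≤ max_repeat

-- 'x is a repeated number with block length p' (within limit, with an admissible count)
def Contrib (limit max_repeat : Int) (p : Nat) (x : Int) : Prop :=
  ∃ (k : Nat) (seq : Int), 2 ≤ k ∧ Allowed max_repeat k ∧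
    (10 : Int) ^ (p - 1) ≤ seq ∧ seq < (10 : Int) ^ p ∧
    seq * S ((10 : Int) ^ p) k ≤ limit ∧ x = seq * S ((10 : Int) ^ p) k

theorem S_nonneg (b : Int) (hb : 0 ≤ b) (k : Nat) : 0 ≤ S b k := by
  induction k with
  | zero => simp [S]
  | succ k ih => simp only [S]; nlinarith

theorem S_succ_ge (b : Int) (hb : 1 ≤ b) (k : Nat) : S b k ≤ S b (k + 1) := by
  have := S_nonneg b (by omega) k
  simp only [S]; nlinarith

theorem S_mono (b : Int) (hb : 1 ≤ b) {k j : Nat} (h : k ≤ j) : S b k ≤ S b j := by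
  induction j with
  | zero => have : k = 0 := by omega
            simp [this]
  | succ j ih =>
    rcases Nat.lt_or_ge k (j + 1) with h' | h'
    · exact le_trans (ih (by omega)) (S_succ_ge b hb j)
    · have : k = j + 1 := by omega
      simp [this]

theorem S_ge_k (b : Int) (hb : 1 ≤ b) (k : Nat) : (k : Int) ≤ S b k := by
  induction k with
  | zero => simp [S]
  | succ k ih =>
    have := S_nonneg b (by omega) k
    simp only [S]; push_cast; nlinarith

theorem S_two (b : Int) : S b 2 = b + 1 := by simp [S]

theorem geom_mul (b : Int) (k : Nat) : (b - 1) * S b k = b ^ k - 1 := by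
  induction k with
  | zero => simp [S]
  | succ k ih =>
    simp only [S, pow_succ]
    have : (b - 1) * (S b k * b + 1) = ((b - 1) * S b k) * b + (b - 1) := by ring
    rw [this, ih]; ring

theorem geom_eq (b : Int) (hb : 2 ≤ b) (k : Nat) :
    PySem.Int.floordiv (b ^ k - 1) (b - 1) = S b k := by
  rw [← geom_mul b k, PySem.Int.floordiv_eq_ediv_of_pos (by omega)]
  exact Int.mul_ediv_cancel_left _ (by omega)

-- value lower bounds ---------------------------------------------------------
theorem min2_def (p : Nat) : (10 : Int) ^ (p - 1) * ((10 : Int) ^ p + 1)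
    = (10 : Int) ^ (p - 1) * S ((10 : Int) ^ p) 2 := by rw [S_two]

theorem contrib_lb (p : Nat) (k : Nat) (seq : Int) (hk : 2 ≤ k)
    (hs : (10 : Int) ^ (p - 1) ≤ seq) :
    (10 : Int) ^ (p - 1) * ((10 : Int) ^ p + 1) ≤ seq * S ((10 : Int) ^ p) k := by
  have hb : (1 : Int) ≤ (10 : Int) ^ p := one_le_pow₀ (by norm_num)
  have h2 : S ((10 : Int) ^ p) 2 ≤ S ((10 : Int) ^ p) k := S_mono _ hb hk
  have hpos : (0 : Int) < (10 : Int) ^ (p - 1) := pow_pos (by norm_num) _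
  rw [min2_def]
  have hS2 : (0 : Int) ≤ S ((10 : Int) ^ p) 2 := S_nonneg _ (by positivity) 2
  nlinarith

theorem min2_mono {p q : Nat} (hp : 1 ≤ p) (h : p ≤ q) :
    (10 : Int) ^ (p - 1) * ((10 : Int) ^ p + 1) ≤ (10 : Int) ^ (q - 1) * ((10 : Int) ^ q + 1) := by
  have h1 : (10 : Int) ^ (p - 1) ≤ (10 : Int) ^ (q - 1) := pow_le_pow_right₀ (by norm_num) (by omega)
  have h2 : (10 : Int) ^ p ≤ (10 : Int) ^ q := pow_le_pow_right₀ (by norm_num) h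
  have h3 := pow_pos (show (0:Int) < 10 by norm_num) (p - 1)
  have h4 := pow_pos (show (0:Int) < 10 by norm_num) p
  nlinarith

theorem p_le_min2 (p : Nat) (hp : 1 ≤ p) :
    (p : Int) ≤ (10 : Int) ^ (p - 1) * ((10 : Int) ^ p + 1) := by
  have h1 : (p - 1 : Nat) < 2 ^ (p - 1) := Nat.lt_two_pow_self
  have h2 : (2 : Nat) ^ (p - 1) ≤ 10 ^ (p - 1) := Nat.pow_le_pow_left (by norm_num) _
  have h3 : (p : Int) ≤ (10 : Int) ^ (p - 1) := by
    have hp' : (p : Nat) ≤ 10 ^ (p - 1) := by omega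
    exact_mod_cast Nat.cast_le.mpr hp'
  have h4 : (1 : Int) ≤ (10 : Int) ^ p := one_le_pow₀ (by norm_num)
  have h5 : (0 : Int) < (10 : Int) ^ (p - 1) := pow_pos (by norm_num) _
  nlinarith

theorem contrib_ge_k (p : Nat) (k : Nat) (seq : Int)
    (hs : (10 : Int) ^ (p - 1) ≤ seq) : (k : Int) ≤ seq * S ((10 : Int) ^ p) k := by
  have hb : (1 : Int) ≤ (10 : Int) ^ p := one_le_pow₀ (by norm_num)
  have h1 : (1 : Int) ≤ seq := le_trans (one_le_pow₀ (by norm_num)) hs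
  have h2 : (k : Int) ≤ S ((10 : Int) ^ p) k := S_ge_k _ hb k
  nlinarith [S_nonneg ((10:Int)^p) (by positivity) k]

theorem val_lb (p : Nat) (rep j : Nat) (seq : Int) (hrj : rep ≤ j)
    (hs : (10:Int)^(p-1) ≤ seq) :
    (10:Int)^(p-1) * S ((10:Int)^p) rep ≤ seq * S ((10:Int)^p) j := by
  have hb : (1:Int) ≤ (10:Int)^p := one_le_pow₀ (by norm_num)
  exact mul_le_mul hs (S_mono _ hb hrj) (S_nonneg _ (by positivity) rep)
    (le_trans (le_of_lt (pow_pos (by norm_num) _)) hs)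

theorem fdiv_pow10 (p : Nat) (hp : 1 ≤ p) :
    PySem.Int.floordiv ((10:Int)^p) 10 = (10:Int)^(p-1) := by
  rw [PySem.Int.floordiv_eq_ediv_of_pos (by norm_num)]
  have : (10:Int)^p = (10:Int)^(p-1) * 10 := by
    rw [← pow_succ]; congr 1; omega
  rw [this, Int.mul_ediv_cancel _ (by norm_num)]

theorem exists_ge_split (k : Nat) (Q : Nat → Prop) :
    (∃ j, k ≤ j ∧ Q j) ↔ Q k ∨ ∃ j, k + 1 ≤ j ∧ Q j := by
  constructor
  · rintro ⟨j, hj, hq⟩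
    rcases Nat.eq_or_lt_of_le hj with rfl | h
    · exact Or.inl hq
    · exact Or.inr ⟨j, h, hq⟩
  · rintro (hq | ⟨j, hj, hq⟩)
    · exact ⟨k, le_refl k, hq⟩
    · exact ⟨j, by omega, hq⟩

theorem contrib_le_limit {limit mr : Int} {q : Nat} {x : Int} (hq : 1 ≤ q)
    (h : Contrib limit mr q x) : (q : Int) ≤ limit := by
  obtain ⟨k, seq, hk, _, hs, _, hle, _⟩ := h
  have h1 := p_le_min2 q hq
  have h2 := contrib_lb q k seq hk hs
  omega

-- fold over the seq range (A's innermost loop) --------------------------------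
theorem mem_foldl_add (l : List Int) (seen : PySem.Set Int) (geom limit x : Int) :
    (x ∈ l.foldl (fun s seq => if seq * geom ≤ limit then PySem.Set.add s (seq * geom) else s) seen)
      ↔ x ∈ seen ∨ ∃ seq ∈ l, seq * geom ≤ limit ∧ x = seq * geom := by
  induction l generalizing seen with
  | nil => simp
  | cons a t ih =>
    simp only [List.foldl_cons, ih]
    by_cases h : a * geom ≤ limit <;> simp [h, PySem.Set.mem_add] <;> tauto

theorem nodup_foldl_add (l : List Int) (seen : PySem.Set Int) (geom limit : Int)
    (h : seen.Nodup) :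
    (l.foldl (fun s seq => let val := seq * geom; if val ≤ limit then PySem.Set.add s val else s) seen).Nodup := by
  induction l generalizing seen with
  | nil => exact h
  | cons a t ih =>
    simp only [List.foldl_cons]
    by_cases hc : a * geom ≤ limit <;> simp only [hc, if_pos, if_neg]
    · exact ih _ (PySem.Set.nodup_add _ _ h)
    · simp [hc]; exact ih _ h

-- characterization of A's inner loop -----------------------------------------
theorem memA_inner (limit max_repeat : Int) (p : Nat) (hp : 1 ≤ p)
    (fuel : Nat) (rep : Nat) (hrep : 2 ≤ rep) (seen : PySem.Set Int) (any : Bool)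
    (hfuel : limit.toNat + 2 ≤ fuel + rep) (x : Int) :
    (x ∈ (aInner limit max_repeat ((10:Int)^p) ((10:Int)^(p-1)) fuel seen any rep).1)
      ↔ x ∈ seen ∨ ∃ (j : Nat) (seq : Int), rep ≤ j ∧ Allowed max_repeat j ∧
          (10:Int)^(p-1) ≤ seq ∧ seq < (10:Int)^p ∧
          seq * S ((10:Int)^p) j ≤ limit ∧ x = seq * S ((10:Int)^p) j := by
  have h10 : (2:Int) ≤ (10:Int)^p := le_trans (by norm_num)
    (le_trans (by norm_num : (10:Int) ≤ 10^1) (pow_le_pow_right₀ (by norm_num) hp))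
  have hms : (1:Int) ≤ (10:Int)^(p-1) := one_le_pow₀ (by norm_num)
  have hmax : (10:Int)^(p-1) ≤ (10:Int)^p - 1 := by
    have : (10:Int)^p = 10 * (10:Int)^(p-1) := by
      rw [← pow_succ']; congr 1; omega
    nlinarith
  induction fuel generalizing rep seen any with
  | zero =>
    simp only [aInner]
    constructor
    · exact Or.inl
    · rintro (hx | ⟨j, seq, hj, _, hs, _, hle, _⟩)
      · exact hx
      · have h1 := contrib_ge_k p j seq hs
        omega
  | succ fuel ih =>
    have hSpos : (0:Int) < S ((10:Int)^p) rep := lt_of_lt_of_le (by exact_mod_cast (by omega : (0:Int) < (rep:Int))) (S_ge_k _ (by omega) rep)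
    simp only [aInner]
    rw [geom_eq _ h10 rep]
    split_ifs with hcap hlim hend
    · -- repeat cap reached: no admissible j ≥ rep remains
      constructor
      · exact Or.inl
      · rintro (hx | ⟨j, seq, hj, hA, _, _, _, _⟩)
        · exact hx
        · rcases hA with h0 | hAle
          · exact absurd h0 hcap.1
          · exfalso
            have : (rep:Int) ≤ (j:Int) := by exact_mod_cast hj
            omega
    · -- even the smallest value exceeds limit: nothing fits at any j ≥ rep
      constructor
      · exact Or.inl
      · rintro (hx | ⟨j, seq, hj, _, hs, _, hle, _⟩)
        · exact hx
        · have := val_lb p rep j seq hj hs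
          omega
    · -- add the whole seq range for this repeat, then recurse
      have hA : Allowed max_repeat rep := by
        rcases eq_or_ne max_repeat 0 with h | h
        · exact Or.inl h
        · refine Or.inr ?_
          have := not_and.mp hcap h
          omega
      refine Iff.trans (ih (rep+1) (by omega) _ _ (by omega)) ?_
      rw [mem_foldl_add]
      constructor
      · rintro ((hx | ⟨seq, hseq, hle, rfl⟩) | ⟨j, seq, hj, hAj, h1, h2, hle, rfl⟩)
        · exact Or.inl hx
        · rw [PySem.List.mem_pyRange_one] at hseq
          have hub : seq < (10:Int)^p := by
            have h1 : seq ≤ min ((10:Int)^p - 1) (PySem.Int.floordiv limit (S ((10:Int)^p) rep)) := by omega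
            have := le_min_iff.mp h1
            omega
          exact Or.inr ⟨rep, seq, le_refl rep, hA, hseq.1, hub, hle, rfl⟩
        · exact Or.inr ⟨j, seq, by omega, hAj, h1, h2, hle, rfl⟩
      · rintro (hx | ⟨j, seq, hj, hAj, h1, h2, hle, rfl⟩)
        · exact Or.inl (Or.inl hx)
        · rcases Nat.eq_or_lt_of_le hj with rfl | hjlt
          · refine Or.inl (Or.inr ⟨seq, ?_, hle, rfl⟩)
            rw [PySem.List.mem_pyRange_one]
            refine ⟨h1, ?_⟩
            have h3 : seq ≤ PySem.Int.floordiv limit (S ((10:Int)^p) rep) :=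
              (PySem.Int.le_floordiv_iff_mul_le hSpos).mpr hle
            have h4 := le_min (show seq ≤ (10:Int)^p - 1 by omega) h3
            omega
          · exact Or.inr ⟨j, seq, by omega, hAj, h1, h2, hle, rfl⟩
    · -- range empty: impossible here, since min_val ≤ limit puts min_seq below end_seq
      exfalso
      push Not at hlim
      exact hend (le_min hmax ((PySem.Int.le_floordiv_iff_mul_le hSpos).mpr hlim))

theorem sndA_inner_false (limit max_repeat : Int) (p : Nat) (hp : 1 ≤ p)
    (fuel : Nat) (rep : Nat) (hrep : 2 ≤ rep) (seen : PySem.Set Int)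
    (hlim : limit < (10:Int)^(p-1) * S ((10:Int)^p) rep) :
    (aInner limit max_repeat ((10:Int)^p) ((10:Int)^(p-1)) fuel seen false rep).2 = false := by
  have h10 : (2:Int) ≤ (10:Int)^p := le_trans (by norm_num)
    (le_trans (by norm_num : (10:Int) ≤ 10^1) (pow_le_pow_right₀ (by norm_num) hp))
  induction fuel generalizing rep seen with
  | zero => rfl
  | succ fuel ih =>
    have hSpos : (0:Int) < S ((10:Int)^p) rep :=
      lt_of_lt_of_le (by exact_mod_cast (by omega : (0:Int) < (rep:Int))) (S_ge_k _ (by omega) rep)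
    simp only [aInner]
    rw [geom_eq _ h10 rep]
    split_ifs with hcap hlim
    · rfl
    · rfl

theorem nodupA_inner (limit max_repeat pow10 min_seq : Int) (fuel : Nat) (rep : Nat)
    (seen : PySem.Set Int) (any : Bool) (h : seen.Nodup) :
    ((aInner limit max_repeat pow10 min_seq fuel seen any rep).1).Nodup := by
  induction fuel generalizing seen any rep with
  | zero => exact h
  | succ fuel ih =>
    simp only [aInner]
    split_ifs with h1 h2 h3
    · exact h
    · exact h
    · exact ih _ _ _ (nodup_foldl_add _ _ _ _ h)
    · exact ih _ _ _ h

-- characterization of A's outer loop -----------------------------------------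
theorem memA_outer (limit max_repeat : Int) (fuel : Nat) (len_seq : Nat) (hl : 1 ≤ len_seq)
    (seen : PySem.Set Int) (hfuel : limit.toNat + 2 ≤ fuel + len_seq) (x : Int) :
    (x ∈ aOuter limit max_repeat fuel len_seq seen)
      ↔ x ∈ seen ∨ ∃ p : Nat, len_seq ≤ p ∧ Contrib limit max_repeat p x := by
  induction fuel generalizing len_seq seen with
  | zero =>
    simp only [aOuter]
    constructor
    · exact Or.inl
    · rintro (hx | ⟨q, hq, hc⟩)
      · exact hx
      · have := contrib_le_limit (by omega) hc
        omega
  | succ fuel ih =>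
    have h10 : (2:Int) ≤ (10:Int)^len_seq := le_trans (by norm_num)
      (le_trans (by norm_num : (10:Int) ≤ 10^1) (pow_le_pow_right₀ (by norm_num) hl))
    simp only [aOuter]
    rw [fdiv_pow10 len_seq hl]
    have hne : ((10:Int)^(len_seq-1) = 0) = False := by
      simp only [eq_iff_iff, iff_false]
      positivity
    have hsq : (10:Int)^len_seq * (10:Int)^len_seq - 1 = ((10:Int)^len_seq)^2 - 1 := by ring
    rw [if_neg (by simp [hne]), hsq, geom_eq _ h10 2]
    by_cases hmin : limit < (10:Int)^(len_seq-1) * S ((10:Int)^len_seq) 2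
    · have hsnd := sndA_inner_false limit max_repeat len_seq hl (limit.toNat+2) 2 (by omega) seen hmin
      rw [if_pos ⟨by rw [hsnd]; simp, hmin⟩,
        memA_inner limit max_repeat len_seq hl (limit.toNat+2) 2 (by omega) seen false (by omega) x]
      have hmin' : limit < (10:Int)^(len_seq-1) * ((10:Int)^len_seq + 1) := by
        rw [min2_def]; exact hmin
      constructor
      · rintro (hx | ⟨j, seq, hj, _, hs, _, hle, _⟩)
        · exact Or.inl hx
        · exfalso
          have := val_lb len_seq 2 j seq hj hs
          rw [min2_def] at hmin'
          omega
      · rintro (hx | ⟨q, hq, hc⟩)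
        · exact Or.inl hx
        · exfalso
          obtain ⟨k, seq, hk, _, hs, _, hle, _⟩ := hc
          have h1 := contrib_lb q k seq hk hs
          have h2 := min2_mono hl hq
          omega
    · rw [if_neg (fun h => hmin h.2)]
      refine Iff.trans (ih (len_seq+1) (by omega) _ (by omega)) ?_
      rw [memA_inner limit max_repeat len_seq hl (limit.toNat+2) 2 (by omega) seen false (by omega) x]
      constructor
      · rintro ((hx | hc) | ⟨q, hq, hcq⟩)
        · exact Or.inl hx
        · exact Or.inr ⟨len_seq, le_refl _, hc⟩
        · exact Or.inr ⟨q, by omega, hcq⟩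
      · rintro (hx | ⟨q, hq, hcq⟩)
        · exact Or.inl (Or.inl hx)
        · rcases Nat.eq_or_lt_of_le hq with rfl | hlt
          · exact Or.inl (Or.inr hcq)
          · exact Or.inr ⟨q, by omega, hcq⟩

theorem nodupA_outer (limit max_repeat : Int) (fuel : Nat) (len_seq : Nat)
    (seen : PySem.Set Int) (h : seen.Nodup) :
    (aOuter limit max_repeat fuel len_seq seen).Nodup := by
  induction fuel generalizing len_seq seen with
  | zero => exact h
  | succ fuel ih =>
    simp only [aOuter]
    split_ifs with h1 h2
    · exact ih _ _ h
    · exact nodupA_inner _ _ _ _ _ _ _ _ h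
    · exact ih _ _ (nodupA_inner _ _ _ _ _ _ _ _ h)

-- characterization of B's loops ----------------------------------------------
theorem memB_inner (limit max_repeat : Int) (p : Nat) (hp : 1 ≤ p) (seq : Int)
    (hs : (10:Int)^(p-1) ≤ seq)
    (fuel : Nat) (k : Nat) (hk : 2 ≤ k) (seen : PySem.Set Int)
    (hfuel : limit.toNat + 2 ≤ fuel + k) (x : Int) :
    (x ∈ bInner limit max_repeat ((10:Int)^p) seq fuel seen (seq * S ((10:Int)^p) k) k)
      ↔ x ∈ seen ∨ ∃ j : Nat, k ≤ j ∧ Allowed max_repeat j ∧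
          seq * S ((10:Int)^p) j ≤ limit ∧ x = seq * S ((10:Int)^p) j := by
  induction fuel generalizing seen k with
  | zero =>
    simp only [bInner]
    constructor
    · exact Or.inl
    · rintro (hx | ⟨j, hj, _, hle, _⟩)
      · exact hx
      · exfalso
        have h1 := contrib_ge_k p j seq hs
        omega
  | succ fuel ih =>
    have hstep : seq * S ((10:Int)^p) k * ((10:Int)^p) + seq = seq * S ((10:Int)^p) (k+1) := by
      simp only [S]; ring
    have hmono : ∀ j, k ≤ j → seq * S ((10:Int)^p) k ≤ seq * S ((10:Int)^p) j := by
      intro j hj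
      have hb : (1:Int) ≤ (10:Int)^p := one_le_pow₀ (by norm_num)
      have hs0 : (0:Int) ≤ seq := le_trans (le_of_lt (pow_pos (by norm_num) _)) hs
      exact mul_le_mul_of_nonneg_left (S_mono _ hb hj) hs0
    simp only [bInner]
    split_ifs with hval hallow
    · rw [hstep, ih (k+1) (by omega) _ (by omega),
        PySem.Set.mem_add, exists_ge_split k]
      have hA : Allowed max_repeat k := hallow
      constructor
      · rintro ((hx | rfl) | hrest)
        · exact Or.inl hx
        · exact Or.inr (Or.inl ⟨hA, hval, rfl⟩)
        · exact Or.inr (Or.inr hrest)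
      · rintro (hx | (⟨_, _, rfl⟩ | hrest))
        · exact Or.inl (Or.inl hx)
        · exact Or.inl (Or.inr rfl)
        · exact Or.inr hrest
    · rw [hstep, ih (k+1) (by omega) _ (by omega), exists_ge_split k]
      have hA : ¬ Allowed max_repeat k := hallow
      constructor
      · rintro (hx | hrest)
        · exact Or.inl hx
        · exact Or.inr (Or.inr hrest)
      · rintro (hx | (⟨hA', _, _⟩ | hrest))
        · exact Or.inl hx
        · exact absurd hA' hA
        · exact Or.inr hrest
    · constructor
      · exact Or.inl
      · rintro (hx | ⟨j, hj, _, hle, _⟩)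
        · exact hx
        · exact absurd hle (by have := hmono j hj; omega)

theorem nodupB_inner (limit max_repeat base seq : Int) (fuel : Nat) (k : Nat)
    (seen : PySem.Set Int) (val : Int) (h : seen.Nodup) :
    (bInner limit max_repeat base seq fuel seen val k).Nodup := by
  induction fuel generalizing seen val k with
  | zero => exact h
  | succ fuel ih =>
    simp only [bInner]
    split_ifs with h1 h2
    · exact ih _ _ _ (PySem.Set.nodup_add _ _ h)
    · exact ih _ _ _ h
    · exact h

theorem mem_foldl_step {α : Type} (l : List α) (step : PySem.Set Int → α → PySem.Set Int)
    (P : α → Prop) (x : Int)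
    (h : ∀ a ∈ l, ∀ s, (x ∈ step s a) ↔ x ∈ s ∨ P a) :
    ∀ seen, (x ∈ l.foldl step seen) ↔ x ∈ seen ∨ ∃ a ∈ l, P a := by
  induction l with
  | nil => simp
  | cons a t ih =>
    intro seen
    simp only [List.foldl_cons]
    rw [ih (fun b hb s => h b (List.mem_cons_of_mem a hb) s), h a List.mem_cons_self]
    simp only [List.mem_cons]
    constructor
    · rintro ((hx | hp') | ⟨b, hb, hPb⟩)
      · exact Or.inl hx
      · exact Or.inr ⟨a, Or.inl rfl, hp'⟩
      · exact Or.inr ⟨b, Or.inr hb, hPb⟩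
    · rintro (hx | ⟨b, (rfl | hb), hPb⟩)
      · exact Or.inl (Or.inl hx)
      · exact Or.inl (Or.inr hPb)
      · exact Or.inr ⟨b, hb, hPb⟩

theorem memB_seq (limit max_repeat : Int) (p : Nat) (hp : 1 ≤ p) (seen : PySem.Set Int) (x : Int) :
    (x ∈ bSeq limit max_repeat ((10:Int)^p) seen)
      ↔ x ∈ seen ∨ Contrib limit max_repeat p x := by
  unfold bSeq
  rw [fdiv_pow10 p hp]
  rw [mem_foldl_step _ _
    (fun seq => ∃ j : Nat, 2 ≤ j ∧ Allowed max_repeat j ∧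
        seq * S ((10:Int)^p) j ≤ limit ∧ x = seq * S ((10:Int)^p) j) x ?_ seen]
  · constructor
    · rintro (hx | ⟨seq, hseq, j, hj, hA, hle, rfl⟩)
      · exact Or.inl hx
      · rw [PySem.List.mem_pyRange_one] at hseq
        exact Or.inr ⟨j, seq, hj, hA, hseq.1, hseq.2, hle, rfl⟩
    · rintro (hx | ⟨j, seq, hj, hA, h1, h2, hle, rfl⟩)
      · exact Or.inl hx
      · exact Or.inr ⟨seq, PySem.List.mem_pyRange_one.mpr ⟨h1, h2⟩, j, hj, hA, hle, rfl⟩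
  · intro seq hseq s
    rw [PySem.List.mem_pyRange_one] at hseq
    have hstep : seq * ((10:Int)^p) + seq = seq * S ((10:Int)^p) 2 := by rw [S_two]; ring
    rw [hstep]
    exact memB_inner limit max_repeat p hp seq hseq.1 (limit.toNat + 2) 2 (by omega) s (by omega) x

theorem nodupB_seq (limit max_repeat base : Int) (seen : PySem.Set Int) (h : seen.Nodup) :
    (bSeq limit max_repeat base seen).Nodup := by
  unfold bSeq
  generalize (PySem.List.pyRange (PySem.Int.floordiv base 10) base 1) = l
  induction l generalizing seen with
  | nil => exact h
  | cons a t ih => exact ih _ (nodupB_inner _ _ _ _ _ _ _ _ h)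

theorem memB_outer (limit max_repeat : Int) (fuel : Nat) (p : Nat) (hp : 1 ≤ p)
    (seen : PySem.Set Int) (hfuel : limit.toNat + 2 ≤ fuel + p) (x : Int) :
    (x ∈ bOuter limit max_repeat fuel p seen)
      ↔ x ∈ seen ∨ ∃ q : Nat, p ≤ q ∧ Contrib limit max_repeat q x := by
  induction fuel generalizing p seen with
  | zero =>
    simp only [bOuter]
    constructor
    · exact Or.inl
    · rintro (hx | ⟨q, hq, hc⟩)
      · exact hx
      · have := contrib_le_limit (by omega) hc
        omega
  | succ fuel ih =>
    simp only [bOuter]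
    split_ifs with hg
    · rw [ih (p+1) (by omega) _ (by omega),
        memB_seq limit max_repeat p hp seen x,
        exists_ge_split p (fun q => Contrib limit max_repeat q x)]
      tauto
    · constructor
      · exact Or.inl
      · rintro (hx | ⟨q, hq, hc⟩)
        · exact hx
        · obtain ⟨k, seq, hk, _, hs, _, hle, _⟩ := hc
          have h1 := contrib_lb q k seq hk hs
          have h2 := min2_mono hp hq
          omega

theorem nodupB_outer (limit max_repeat : Int) (fuel : Nat) (p : Nat)
    (seen : PySem.Set Int) (h : seen.Nodup) :
    (bOuter limit max_repeat fuel p seen).Nodup := by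
  induction fuel generalizing p seen with
  | zero => exact h
  | succ fuel ih =>
    simp only [bOuter]
    split_ifs with h1
    · exact ih _ _ (nodupB_seq _ _ _ _ h)
    · exact h

-- ===== VERDICT (by name: the statement is the Claim_ definition above) =====
theorem generate_repeated_numbers_spec : Claim_equal_generate_repeated_numbers := by
  intro limit max_repeat _
  unfold Spec_generate_repeated_numbers generate_repeated_numbers generate_repeated_numbers_alt
  have hA := nodupA_outer limit max_repeat (limit.toNat + 2) 1 PySem.Set.empty (by simp [PySem.Set.empty])
  have hB := nodupB_outer limit max_repeat (limit.toNat + 2) 1 PySem.Set.empty (by simp [PySem.Set.empty])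
  refine PySem.List.sorted_eq_sorted_of_perm _ _ _ (fun a b h => h) ?_
  rw [List.perm_ext_iff_of_nodup hA hB]
  intro x
  rw [memA_outer limit max_repeat _ 1 (by omega) _ (by omega),
      memB_outer limit max_repeat _ 1 (by omega) _ (by omega)]
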